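-- pv_equiv track=rewrite | github.com/R1MURUN0PR0/Crack_random | glibc_random/crack.py | crack
-- ===== SOURCE A (Python) =====
-- def crack(outputs):
--     states = []
--
--     for i in range(len(outputs)):
--         if (i >= 31 and
--             outputs[i]      != None and
--             outputs[i - 31] != None and
--             outputs[i - 3]  != None and
--             outputs[i] != (outputs[i - 31] + outputs[i - 3]) & 0x7fffffff
--         ):
--             states[i - 31] = (outputs[i - 31] << 1) + 1
--             states[i - 3]  = (outputs[i - 3]  << 1) + 1
--             states.append((outputs[i] << 1) + 0)
--         else:
--             states.append(None)
--
--     return states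
-- ===== SOURCE B (Python) =====
-- def crack(outputs):
--     n = len(outputs)
--     trigger = [
--         (i >= 31 and
--          outputs[i] != None and
--          outputs[i - 31] != None and
--          outputs[i - 3] != None and
--          outputs[i] != (outputs[i - 31] + outputs[i - 3]) & 0x7fffffff)
--         for i in range(n)
--     ]
--     states = [None] * n
--     for j in range(n):
--         if (j + 31 < n and trigger[j + 31]) or (j + 3 < n and trigger[j + 3]):
--             states[j] = (outputs[j] << 1) + 1
--         elif trigger[j]:
--             states[j] = (outputs[j] << 1) + 0
--     return states
-- ===== Notes on version B (the rewrite author's own statement) =====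
-- stated objective: alternative
-- what changed: Replaces A's single pass with in-place back-patching of already-appended entries by a two-pass table derivation: first compute a boolean trigger table, then fill each position j directly from trigger[j+31]/trigger[j+3]/trigger[j], with no mutation of earlier output cells.
import Mathlib
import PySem

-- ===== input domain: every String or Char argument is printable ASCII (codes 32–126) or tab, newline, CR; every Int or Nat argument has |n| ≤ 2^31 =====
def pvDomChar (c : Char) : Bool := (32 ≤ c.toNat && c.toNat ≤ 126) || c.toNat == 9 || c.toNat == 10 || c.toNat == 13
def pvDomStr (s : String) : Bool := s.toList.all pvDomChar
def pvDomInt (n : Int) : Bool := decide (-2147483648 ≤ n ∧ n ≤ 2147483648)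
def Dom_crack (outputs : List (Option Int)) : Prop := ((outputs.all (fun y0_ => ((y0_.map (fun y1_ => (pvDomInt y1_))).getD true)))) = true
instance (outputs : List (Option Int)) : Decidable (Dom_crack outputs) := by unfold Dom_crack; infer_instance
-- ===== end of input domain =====

-- B replaces A's single pass with in-place back-patching by a two-pass table derivation
-- (trigger table first, then each cell computed directly); alternative decomposition, same cost.
-- Python's 'x & 0x7fffffff' is ported exactly as floor-mod by 2^31 (PySem.Int.mod; equal for all ints),
-- and 'x << 1' exactly as x * 2.

-- shared indexing helper: outputs[i] (indices here are always in range in both programs)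
def getO (outputs : List (Option Int)) (i : Nat) : Option Int := outputs.getD i none

-- ===== PORT A =====
-- one loop step of A: the big if / in-place back-patch / append
def crackStep (outputs : List (Option Int)) (states : List (Option Int)) (i : Nat) : List (Option Int) :=
  if 31 ≤ i then
    match getO outputs i, getO outputs (i - 31), getO outputs (i - 3) with
    | some a, some b, some c =>
      if a ≠ PySem.Int.mod (b + c) 2147483648 then
        ((states.set (i - 31) (some (b * 2 + 1))).set (i - 3) (some (c * 2 + 1))) ++ [some (a * 2 + 0)]
      else states ++ [none]
    | _, _, _ => states ++ [none]
  else states ++ [none]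

def crack (outputs : List (Option Int)) : List (Option Int) :=
  (List.range outputs.length).foldl (crackStep outputs) []

-- ===== PORT B =====
-- B's first pass: the trigger table entry at index i
def trigger_alt (outputs : List (Option Int)) (i : Nat) : Bool :=
  decide (31 ≤ i) &&
    (match getO outputs i, getO outputs (i - 31), getO outputs (i - 3) with
     | some a, some b, some c => decide (a ≠ PySem.Int.mod (b + c) 2147483648)
     | _, _, _ => false)

def crack_alt (outputs : List (Option Int)) : List (Option Int) :=
  let n := outputs.length
  let trigger := (List.range n).map (trigger_alt outputs)
  (List.range n).map (fun j =>
    if trigger.getD (j + 31) false || trigger.getD (j + 3) false then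
      (getO outputs j).map (fun x => x * 2 + 1)
    else if trigger.getD j false then
      (getO outputs j).map (fun x => x * 2 + 0)
    else none)

-- ===== PRECONDITION & SPEC =====
def Spec_crack (outputs : List (Option Int)) (out : List (Option Int)) : Prop := out = crack_alt outputs
instance (outputs : List (Option Int)) (out : List (Option Int)) : Decidable (Spec_crack outputs out) := by unfold Spec_crack; infer_instance

-- ===== CLAIM (what is proved, stated in full; the proofs are below) =====
def Claim_equal_crack : Prop := ∀ (outputs : List (Option Int)), Dom_crack outputs → Spec_crack outputs (crack outputs)

-- ===== LEMMAS AND PROOFS =====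

-- value of cell j once all steps < k have run
def Fval (outputs : List (Option Int)) (k j : Nat) : Option Int :=
  if (j + 31 < k ∧ trigger_alt outputs (j + 31) = true) ∨ (j + 3 < k ∧ trigger_alt outputs (j + 3) = true) then
    (getO outputs j).map (fun x => x * 2 + 1)
  else if trigger_alt outputs j = true then
    (getO outputs j).map (fun x => x * 2 + 0)
  else none

theorem trig_some (outputs : List (Option Int)) (i : Nat)
    (h : trigger_alt outputs i = true) :
    31 ≤ i ∧ ∃ a b c, getO outputs i = some a ∧ getO outputs (i - 31) = some b ∧
      getO outputs (i - 3) = some c ∧ a ≠ PySem.Int.mod (b + c) 2147483648 := by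
  unfold trigger_alt at h
  rcases ha : getO outputs i with _ | a <;>
  rcases hb : getO outputs (i - 31) with _ | b <;>
  rcases hc : getO outputs (i - 3) with _ | c <;>
    rw [ha, hb, hc] at h <;> simp at h
  exact ⟨h.1, a, b, c, rfl, rfl, rfl, by simpa using h.2⟩

theorem crackStep_of_trig_false (outputs s : List (Option Int)) (k : Nat)
    (h : trigger_alt outputs k = false) :
    crackStep outputs s k = s ++ [none] := by
  unfold trigger_alt at h
  unfold crackStep
  by_cases h31 : 31 ≤ k
  · rw [if_pos h31]
    rcases ha : getO outputs k with _ | a <;>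
    rcases hb : getO outputs (k - 31) with _ | b <;>
    rcases hc : getO outputs (k - 3) with _ | c
    all_goals try rfl
    rw [ha, hb, hc] at h
    simp [h31] at h
    simp [h]
  · rw [if_neg h31]

theorem crackStep_of_trig_true (outputs s : List (Option Int)) (k : Nat) (a b c : Int)
    (h31 : 31 ≤ k)
    (ha : getO outputs k = some a) (hb : getO outputs (k - 31) = some b)
    (hc : getO outputs (k - 3) = some c)
    (hne : a ≠ PySem.Int.mod (b + c) 2147483648) :
    crackStep outputs s k =
      ((s.set (k - 31) (some (b * 2 + 1))).set (k - 3) (some (c * 2 + 1))) ++ [some (a * 2 + 0)] := by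
  unfold crackStep
  rw [if_pos h31, ha, hb, hc]
  simp
  rw [← PySem.Int.mod_eq_emod_of_pos (by norm_num : (0:Int) < 2147483648)]
  exact hne

theorem crack_foldl (outputs : List (Option Int)) (k : Nat) :
    (List.range k).foldl (crackStep outputs) [] = (List.range k).map (Fval outputs k) := by
  induction k with
  | zero => rfl
  | succ k ih =>
    rw [List.range_succ, List.foldl_append, List.map_append, ih]
    simp only [List.foldl_cons, List.foldl_nil]
    rcases htr : trigger_alt outputs k with _ | _
    · -- trigger false at k: step appends none, earlier cells unchanged
      rw [crackStep_of_trig_false outputs _ k htr]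
      have h1 : (List.range k).map (Fval outputs k) = (List.range k).map (Fval outputs (k + 1)) := by
        apply List.map_congr_left
        intro j hj
        have hjk : j < k := List.mem_range.mp hj
        unfold Fval
        have : ((j + 31 < k + 1 ∧ trigger_alt outputs (j + 31) = true) ∨
                (j + 3 < k + 1 ∧ trigger_alt outputs (j + 3) = true)) ↔
               ((j + 31 < k ∧ trigger_alt outputs (j + 31) = true) ∨
                (j + 3 < k ∧ trigger_alt outputs (j + 3) = true)) := by
          constructor
          · rintro (⟨hlt, ht⟩ | ⟨hlt, ht⟩)
            · rcases Nat.lt_succ_iff_lt_or_eq.mp hlt with h | h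
              · exact Or.inl ⟨h, ht⟩
              · rw [h] at ht; rw [ht] at htr; cases htr
            · rcases Nat.lt_succ_iff_lt_or_eq.mp hlt with h | h
              · exact Or.inr ⟨h, ht⟩
              · rw [h] at ht; rw [ht] at htr; cases htr
          · rintro (⟨hlt, ht⟩ | ⟨hlt, ht⟩)
            · exact Or.inl ⟨by omega, ht⟩
            · exact Or.inr ⟨by omega, ht⟩
        rw [if_congr this rfl rfl]
      have h2 : Fval outputs (k + 1) k = none := by
        unfold Fval
        have hc1 : ¬ ((k + 31 < k + 1 ∧ trigger_alt outputs (k + 31) = true) ∨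
                      (k + 3 < k + 1 ∧ trigger_alt outputs (k + 3) = true)) := by
          rintro (⟨h, _⟩ | ⟨h, _⟩) <;> omega
        rw [if_neg hc1, if_neg (by simp [htr])]
      rw [h1, List.map_cons, List.map_nil, h2]
    · -- trigger true at k: back-patch k-31 and k-3, append a*2
      obtain ⟨h31, a, b, c, ha, hb, hc, hne⟩ := trig_some outputs k htr
      rw [crackStep_of_trig_true outputs _ k a b c h31 ha hb hc hne]
      have h2 : Fval outputs (k + 1) k = some (a * 2 + 0) := by
        unfold Fval
        have hc1 : ¬ ((k + 31 < k + 1 ∧ trigger_alt outputs (k + 31) = true) ∨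
                      (k + 3 < k + 1 ∧ trigger_alt outputs (k + 3) = true)) := by
          rintro (⟨h, _⟩ | ⟨h, _⟩) <;> omega
        rw [if_neg hc1, if_pos htr, ha]
        rfl
      have h1 : (((List.range k).map (Fval outputs k)).set (k - 31) (some (b * 2 + 1))).set
            (k - 3) (some (c * 2 + 1)) = (List.range k).map (Fval outputs (k + 1)) := by
        apply List.ext_getElem
        · simp
        · intro j hj hj'
          have hjk : j < k := by simpa using hj'
          simp only [List.getElem_set, List.getElem_map, List.getElem_range]
          by_cases hja : k - 3 = j
          · rw [if_pos hja]
            unfold Fval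
            have : (j + 31 < k + 1 ∧ trigger_alt outputs (j + 31) = true) ∨
                   (j + 3 < k + 1 ∧ trigger_alt outputs (j + 3) = true) := by
              refine Or.inr ⟨by omega, ?_⟩
              have : j + 3 = k := by omega
              rw [this, htr]
            rw [if_pos this]
            have : getO outputs j = some c := by
              have hjc : j = k - 3 := by omega
              rw [hjc]; exact hc
            rw [this]; rfl
          · rw [if_neg hja]
            by_cases hjb : k - 31 = j
            · rw [if_pos hjb]
              unfold Fval
              have : (j + 31 < k + 1 ∧ trigger_alt outputs (j + 31) = true) ∨
                     (j + 3 < k + 1 ∧ trigger_alt outputs (j + 3) = true) := by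
                refine Or.inl ⟨by omega, ?_⟩
                have : j + 31 = k := by omega
                rw [this, htr]
              rw [if_pos this]
              have : getO outputs j = some b := by
                have hjc : j = k - 31 := by omega
                rw [hjc]; exact hb
              rw [this]; rfl
            · rw [if_neg hjb]
              unfold Fval
              have heq : ((j + 31 < k + 1 ∧ trigger_alt outputs (j + 31) = true) ∨
                      (j + 3 < k + 1 ∧ trigger_alt outputs (j + 3) = true)) ↔
                     ((j + 31 < k ∧ trigger_alt outputs (j + 31) = true) ∨
                      (j + 3 < k ∧ trigger_alt outputs (j + 3) = true)) := by
                constructor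
                · rintro (⟨hlt, ht⟩ | ⟨hlt, ht⟩)
                  · exact Or.inl ⟨by omega, ht⟩
                  · exact Or.inr ⟨by omega, ht⟩
                · rintro (⟨hlt, ht⟩ | ⟨hlt, ht⟩)
                  · exact Or.inl ⟨by omega, ht⟩
                  · exact Or.inr ⟨by omega, ht⟩
              rw [if_congr heq rfl rfl]
      rw [h1, List.map_cons, List.map_nil, h2]

theorem alt_cell (outputs : List (Option Int)) (j : Nat) (hj : j < outputs.length) :
    (if ((List.range outputs.length).map (trigger_alt outputs)).getD (j + 31) false ||
        ((List.range outputs.length).map (trigger_alt outputs)).getD (j + 3) false then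
       (getO outputs j).map (fun x => x * 2 + 1)
     else if ((List.range outputs.length).map (trigger_alt outputs)).getD j false then
       (getO outputs j).map (fun x => x * 2 + 0)
     else none) = Fval outputs outputs.length j := by
  have hget : ∀ i : Nat, ((List.range outputs.length).map (trigger_alt outputs)).getD i false =
      if i < outputs.length then trigger_alt outputs i else false := by
    intro i
    by_cases hi : i < outputs.length
    · rw [List.getD_eq_getElem _ _ (by simpa using hi), List.getElem_map, List.getElem_range,
        if_pos hi]
    · rw [List.getD_eq_default _ _ (by simpa using Nat.le_of_not_lt hi), if_neg hi]
  rw [hget, hget, hget, if_pos hj]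
  unfold Fval
  by_cases h1 : (j + 31 < outputs.length ∧ trigger_alt outputs (j + 31) = true) ∨
                (j + 3 < outputs.length ∧ trigger_alt outputs (j + 3) = true)
  · rw [if_pos h1]
    have : ((if j + 31 < outputs.length then trigger_alt outputs (j + 31) else false) ||
            (if j + 3 < outputs.length then trigger_alt outputs (j + 3) else false)) = true := by
      rcases h1 with ⟨hlt, ht⟩ | ⟨hlt, ht⟩ <;> simp [hlt, ht]
    rw [if_pos this]
  · rw [if_neg h1]
    have e1 : (if j + 31 < outputs.length then trigger_alt outputs (j + 31) else false) = false := by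
      by_cases h : j + 31 < outputs.length
      · rw [if_pos h]
        cases htv : trigger_alt outputs (j + 31) with
        | false => rfl
        | true => exact absurd (Or.inl ⟨h, htv⟩) h1
      · rw [if_neg h]
    have e2 : (if j + 3 < outputs.length then trigger_alt outputs (j + 3) else false) = false := by
      by_cases h : j + 3 < outputs.length
      · rw [if_pos h]
        cases htv : trigger_alt outputs (j + 3) with
        | false => rfl
        | true => exact absurd (Or.inr ⟨h, htv⟩) h1
      · rw [if_neg h]
    rw [e1, e2]
    simp

theorem crack_eq_alt (outputs : List (Option Int)) : crack outputs = crack_alt outputs := by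
  unfold crack crack_alt
  simp only []
  rw [crack_foldl]
  apply List.map_congr_left
  intro j hj
  exact (alt_cell outputs j (List.mem_range.mp hj)).symm

-- ===== VERDICT (by name: the statement is the Claim_ definition above) =====
theorem crack_spec : Claim_equal_crack := by
  intro outputs _
  unfold Spec_crack
  exact crack_eq_alt outputs
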